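-- pv_equiv track=rewrite | github.com/simowardi/Keyword-Mapper-Pro | KMP/models/filter.py | filter_keywords
-- ===== SOURCE A (Python) =====
-- def matches_pattern(keyword, pattern):
--     """
--     Check if a keyword matches a given pattern.
--     Args:
--         keyword (str): The keyword to check.
--         pattern (str): The pattern to match against.
--     Returns:
--         bool: True if the keyword matches the pattern, False otherwise.
--     """
--     if pattern.startswith('[') and pattern.endswith(']'):
--         return keyword.lower() == pattern[1:-1].lower()
--     elif pattern.startswith('"') and pattern.endswith('"'):
--         return pattern[1:-1].lower() in keyword.lower()
--     else:
--         # You could use regex here if desired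
--         return all(word.lower() in keyword.lower() for word in pattern.split())
--
-- def filter_keywords(positive_keyword_list, negative_keyword_list, keywords_to_match):
--     """
--     Filter keywords based on positive and negative keyword patterns.
--     Args:
--         positive_keyword_list (list): List of patterns to match against positively.
--         negative_keyword_list (list): List of patterns to filter out negatively.
--         keywords_to_match (list): List of keywords to be checked.
--     Returns:
--         tuple: A tuple containing:
--             - matched_keywords (list): Keywords that match the positive patterns.
--             - not_matched_keywords (list): Keywords that do not match and those filtered out.
--     """
--     matched_keywords = [keyword for keyword in keywords_to_match
--                         if any(matches_pattern(keyword, pattern) for pattern in positive_keyword_list)]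
--
--     filtered_keywords = [keyword for keyword in matched_keywords
--                          if any(matches_pattern(keyword, pattern) for pattern in negative_keyword_list)]
--
--     final_matched_keywords = [keyword for keyword in matched_keywords if keyword not in filtered_keywords]
--
--     not_matched_keywords = [keyword for keyword in keywords_to_match if keyword not in matched_keywords]
--     not_matched_keywords.extend(filtered_keywords)
--
--     return final_matched_keywords, not_matched_keywords
-- ===== SOURCE B (Python) =====
-- def matches_pattern(keyword, pattern):
--     if pattern.startswith('[') and pattern.endswith(']'):
--         return keyword.lower() == pattern[1:-1].lower()
--     elif pattern.startswith('"') and pattern.endswith('"'):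
--         return pattern[1:-1].lower() in keyword.lower()
--     else:
--         return all(word.lower() in keyword.lower() for word in pattern.split())
--
-- def filter_keywords(positive_keyword_list, negative_keyword_list, keywords_to_match):
--     final_matched, filtered, not_matched = [], [], []
--     for keyword in keywords_to_match:
--         if any(matches_pattern(keyword, p) for p in positive_keyword_list):
--             if any(matches_pattern(keyword, p) for p in negative_keyword_list):
--                 filtered.append(keyword)
--             else:
--                 final_matched.append(keyword)
--         else:
--             not_matched.append(keyword)
--     return final_matched, not_matched + filtered
-- ===== Notes on version B (the rewrite author's own statement) =====
-- stated objective: simpler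
-- what changed: Replaced four comprehensions with list-membership back-tests by a single loop over keywords_to_match that classifies each keyword once into final_matched/filtered/not_matched and concatenates at the end.
import Mathlib
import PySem

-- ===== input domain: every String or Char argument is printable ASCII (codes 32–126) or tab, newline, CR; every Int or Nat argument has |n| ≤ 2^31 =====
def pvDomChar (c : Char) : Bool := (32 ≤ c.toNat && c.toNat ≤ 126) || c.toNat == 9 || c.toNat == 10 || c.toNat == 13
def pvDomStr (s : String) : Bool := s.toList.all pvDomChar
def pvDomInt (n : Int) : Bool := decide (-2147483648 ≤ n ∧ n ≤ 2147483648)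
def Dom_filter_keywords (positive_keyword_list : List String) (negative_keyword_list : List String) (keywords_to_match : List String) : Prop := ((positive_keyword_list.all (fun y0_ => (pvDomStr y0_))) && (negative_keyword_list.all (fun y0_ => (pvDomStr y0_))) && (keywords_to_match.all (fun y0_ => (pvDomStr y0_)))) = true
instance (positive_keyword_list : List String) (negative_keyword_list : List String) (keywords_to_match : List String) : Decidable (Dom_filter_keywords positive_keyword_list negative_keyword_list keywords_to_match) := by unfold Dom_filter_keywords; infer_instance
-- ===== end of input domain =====

-- B replaces A's four comprehensions (with list-membership back-tests) by one classifying
-- pass over keywords_to_match; return value proved identical (simpler decomposition).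

-- ===== PORT A =====
-- shared helper: unchanged in both Source A and Source B
def matches_pattern (keyword pattern : String) : Bool :=
  if PySem.Str.startswith pattern "[" && PySem.Str.endswith pattern "]" then
    PySem.Str.lower keyword == PySem.Str.lower (PySem.Str.slice pattern (some 1) (some (-1)))
  else if PySem.Str.startswith pattern "\"" && PySem.Str.endswith pattern "\"" then
    PySem.Str.isIn (PySem.Str.lower (PySem.Str.slice pattern (some 1) (some (-1)))) (PySem.Str.lower keyword)
  else
    (PySem.Str.split₀ pattern).all
      (fun word => PySem.Str.isIn (PySem.Str.lower word) (PySem.Str.lower keyword))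

def filter_keywords (positive_keyword_list : List String) (negative_keyword_list : List String) (keywords_to_match : List String) : List String × List String :=
  let matched_keywords := keywords_to_match.filter
    (fun keyword => positive_keyword_list.any (fun pattern => matches_pattern keyword pattern))
  let filtered_keywords := matched_keywords.filter
    (fun keyword => negative_keyword_list.any (fun pattern => matches_pattern keyword pattern))
  let final_matched_keywords := matched_keywords.filter
    (fun keyword => !(filtered_keywords.contains keyword))
  let not_matched_keywords := keywords_to_match.filter
    (fun keyword => !(matched_keywords.contains keyword))
  (final_matched_keywords, not_matched_keywords ++ filtered_keywords)

-- ===== PORT B =====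
def filter_keywords_alt (positive_keyword_list : List String) (negative_keyword_list : List String) (keywords_to_match : List String) : List String × List String :=
  let acc := keywords_to_match.foldl
    (fun (acc : List String × List String × List String) keyword =>
      if positive_keyword_list.any (fun p => matches_pattern keyword p) then
        if negative_keyword_list.any (fun p => matches_pattern keyword p) then
          (acc.1, acc.2.1 ++ [keyword], acc.2.2)
        else
          (acc.1 ++ [keyword], acc.2.1, acc.2.2)
      else
        (acc.1, acc.2.1, acc.2.2 ++ [keyword]))
    ([], [], [])
  (acc.1, acc.2.2 ++ acc.2.1)

-- ===== PRECONDITION & SPEC =====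
def Spec_filter_keywords (positive_keyword_list : List String) (negative_keyword_list : List String) (keywords_to_match : List String) (out : List String × List String) : Prop := out = filter_keywords_alt positive_keyword_list negative_keyword_list keywords_to_match
instance (positive_keyword_list : List String) (negative_keyword_list : List String) (keywords_to_match : List String) (out : List String × List String) : Decidable (Spec_filter_keywords positive_keyword_list negative_keyword_list keywords_to_match out) := by unfold Spec_filter_keywords; infer_instance

-- ===== CLAIM (what is proved, stated in full; the proofs are below) =====
def Claim_equal_filter_keywords : Prop := ∀ (positive_keyword_list : List String) (negative_keyword_list : List String) (keywords_to_match : List String), Dom_filter_keywords positive_keyword_list negative_keyword_list keywords_to_match → Spec_filter_keywords positive_keyword_list negative_keyword_list keywords_to_match (filter_keywords positive_keyword_list negative_keyword_list keywords_to_match)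

-- ===== LEMMAS AND PROOFS =====

-- B's fold appends the three filters of the remaining list onto the accumulators.
theorem fkAlt_foldl_eq (pos neg : String → Bool) (K : List String)
    (a b c : List String) :
    K.foldl
      (fun (acc : List String × List String × List String) k =>
        if pos k then
          if neg k then (acc.1, acc.2.1 ++ [k], acc.2.2)
          else (acc.1 ++ [k], acc.2.1, acc.2.2)
        else (acc.1, acc.2.1, acc.2.2 ++ [k]))
      (a, b, c)
    = (a ++ K.filter (fun k => pos k && !neg k),
       b ++ K.filter (fun k => pos k && neg k),
       c ++ K.filter (fun k => !pos k)) := by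
  induction K generalizing a b c with
  | nil => simp
  | cons k K ih =>
    by_cases hp : pos k = true <;> by_cases hn : neg k = true <;>
      simp [hp, hn, ih]

theorem filterA_eq (pos neg : String → Bool) (K : List String) :
    (let matched := K.filter pos
     let filtered := matched.filter neg
     ((matched.filter (fun k => !(filtered.contains k))),
      (K.filter (fun k => !(matched.contains k))) ++ filtered)) =
    (K.filter (fun k => pos k && !neg k),
     K.filter (fun k => !pos k) ++ K.filter (fun k => pos k && neg k)) := by
  simp only [Prod.mk.injEq]
  have hfilt : (K.filter pos).filter neg = K.filter (fun k => pos k && neg k) := by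
    rw [List.filter_filter]
    exact List.filter_congr (fun x _ => by simp [Bool.and_comm])
  constructor
  · rw [hfilt]
    have h1 : ((K.filter pos).filter
        (fun k => !((K.filter (fun k => pos k && neg k)).contains k)))
        = (K.filter pos).filter (fun k => !neg k) := by
      apply List.filter_congr
      intro x hx
      have hxK : x ∈ K := (List.mem_filter.mp hx).1
      have hxp : pos x = true := (List.mem_filter.mp hx).2
      by_cases hnx : neg x = true
      · have : x ∈ K.filter (fun k => pos k && neg k) :=
          List.mem_filter.mpr ⟨hxK, by simp [hxp, hnx]⟩
        simp [hnx, this]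
      · have : x ∉ K.filter (fun k => pos k && neg k) := by
          intro h
          exact hnx (by simpa [hxp] using (List.mem_filter.mp h).2)
        simp [hnx, this]
    rw [h1, List.filter_filter]
    exact List.filter_congr (fun x _ => by simp [Bool.and_comm])
  · rw [hfilt]
    congr 1
    apply List.filter_congr
    intro x hxK
    by_cases hxp : pos x = true
    · have : x ∈ K.filter pos := List.mem_filter.mpr ⟨hxK, hxp⟩
      simp [this, hxp]
    · have : x ∉ K.filter pos := fun h => hxp (List.mem_filter.mp h).2
      simp [this, hxp]

-- ===== VERDICT (by name: the statement is the Claim_ definition above) =====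
theorem filter_keywords_spec : Claim_equal_filter_keywords := by
  intro P N K _
  unfold Spec_filter_keywords filter_keywords_alt
  rw [fkAlt_foldl_eq (fun k => P.any (fun p => matches_pattern k p))
        (fun k => N.any (fun p => matches_pattern k p)) K [] [] []]
  simp only [List.nil_append]
  exact filterA_eq (fun k => P.any (fun p => matches_pattern k p))
    (fun k => N.any (fun p => matches_pattern k p)) K
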